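-- pv_equiv track=rewrite | github.com/anton-stefanovich/epam | test.py | magic_func
-- ===== SOURCE A (Python) =====
-- figures = {
--     'queen': [
--         # 0:
--         [8, 5, 2],
--         # [7, 9, 8, 5, 2],
--         # 1:
--         [2, 3, 4, 7, 5, 9],
--         # 2:
--         [1, 3, 5, 8, 0],
--         # [1, 3, 5, 8, 0, 4, 6],
--         # 3:
--         [2, 1, 6, 9, 5, 7],
--         # 4:
--         [1, 2, 5, 6, 8, 7],
--         # 5:
--         [1, 2, 3, 4, 6, 7, 8, 0, 9],
--         # 6:
--         [3, 2, 5, 4, 8, 9],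
--         # 7:
--         [4, 1, 5, 3, 8, 9, 0],
--         # 8:
--         [7, 4, 5, 2, 6, 9, 0],
--         # 9:
--         [8, 7, 5, 1, 6, 3, 0],
--     ],
--
--     'king': [
--         # 0:
--         [7, 8, 9],
--         # 1:
--         [2, 5, 4],
--         # 2:
--         [1, 4, 5, 6, 3],
--         # 3:
--         [2, 5, 6],
--         # 4:
--         [1, 2, 5, 8, 7],
--         # 5:
--         [1, 2, 3, 4, 6, 7, 8, 9],
--         # 6:
--         [3, 2, 5, 8, 9],
--         # 7:
--         [4, 5, 8, 0],
--         # 8: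
--         [4, 5, 6, 7, 9, 0],
--         # 9:
--         [6, 5, 8, 0],
--     ]
-- }
--
-- def magic_func(current, figure, length):
--     results = []
--     for next_pos in figures.get(figure)[current[-1]]:
--         sequence = current.copy()
--         sequence.append(next_pos)
--
--         results += (
--             [sequence]
--             if len(sequence) >= length
--             else magic_func(sequence, figure, length))
--
--     return results
-- ===== SOURCE B (Python) =====
-- figures = {
--     'queen': [
--         [8, 5, 2],
--         [2, 3, 4, 7, 5, 9],
--         [1, 3, 5, 8, 0],
--         [2, 1, 6, 9, 5, 7],
--         [1, 2, 5, 6, 8, 7],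
--         [1, 2, 3, 4, 6, 7, 8, 0, 9],
--         [3, 2, 5, 4, 8, 9],
--         [4, 1, 5, 3, 8, 9, 0],
--         [7, 4, 5, 2, 6, 9, 0],
--         [8, 7, 5, 1, 6, 3, 0],
--     ],
--     'king': [
--         [7, 8, 9],
--         [2, 5, 4],
--         [1, 4, 5, 6, 3],
--         [2, 5, 6],
--         [1, 2, 5, 8, 7],
--         [1, 2, 3, 4, 6, 7, 8, 9],
--         [3, 2, 5, 8, 9],
--         [4, 5, 8, 0],
--         [4, 5, 6, 7, 9, 0],
--         [6, 5, 8, 0],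
--     ]
-- }
--
-- def magic_func(current, figure, length):
--     rows = figures.get(figure)
--     frontier = [current]
--     while True:
--         frontier = [seq + [nxt] for seq in frontier for nxt in rows[seq[-1]]]
--         if len(frontier[0]) >= length:
--             return frontier
-- ===== Notes on version B (the rewrite author's own statement) =====
-- stated objective: alternative
-- what changed: Replaces A's depth-first recursion (recursing per appended digit) with an iterative level-by-level frontier expansion that rebuilds the whole list of partial paths once per level; leaf order is identical because all paths reach the target length together.
import Mathlib
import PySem

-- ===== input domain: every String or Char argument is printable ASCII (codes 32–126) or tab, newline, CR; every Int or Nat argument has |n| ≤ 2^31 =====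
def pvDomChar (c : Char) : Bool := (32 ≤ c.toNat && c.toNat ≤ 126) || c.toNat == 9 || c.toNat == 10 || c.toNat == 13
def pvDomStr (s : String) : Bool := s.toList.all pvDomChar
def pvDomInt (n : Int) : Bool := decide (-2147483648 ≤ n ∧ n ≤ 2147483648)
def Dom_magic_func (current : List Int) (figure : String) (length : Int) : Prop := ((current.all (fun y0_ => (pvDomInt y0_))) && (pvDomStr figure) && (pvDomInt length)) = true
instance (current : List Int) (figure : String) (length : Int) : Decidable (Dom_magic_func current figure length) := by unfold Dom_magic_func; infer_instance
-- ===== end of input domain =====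

-- B replaces A's depth-first recursion with an iterative level-by-level frontier expansion
-- (same leaf order, since every path reaches the target length at the same level); objective: alternative.

-- the module-level 'figures' table
def pvQueenRows : List (List Int) :=
  [[8, 5, 2], [2, 3, 4, 7, 5, 9], [1, 3, 5, 8, 0], [2, 1, 6, 9, 5, 7], [1, 2, 5, 6, 8, 7],
   [1, 2, 3, 4, 6, 7, 8, 0, 9], [3, 2, 5, 4, 8, 9], [4, 1, 5, 3, 8, 9, 0], [7, 4, 5, 2, 6, 9, 0],
   [8, 7, 5, 1, 6, 3, 0]]

def pvKingRows : List (List Int) :=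
  [[7, 8, 9], [2, 5, 4], [1, 4, 5, 6, 3], [2, 5, 6], [1, 2, 5, 8, 7], [1, 2, 3, 4, 6, 7, 8, 9],
   [3, 2, 5, 8, 9], [4, 5, 8, 0], [4, 5, 6, 7, 9, 0], [6, 5, 8, 0]]

def pvFigures : PySem.Dict String (List (List Int)) :=
  PySem.Dict.ofList [("queen", pvQueenRows), ("king", pvKingRows)]

-- ===== PORT A =====
-- 'figures.get(figure)[current[-1]]' via PySem.Dict.get? / PySem.List.pyGet?; the getD defaults are
-- only reached outside Pre_magic_func (where Python raises TypeError/IndexError).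
mutual
def magic_func (current : List Int) (figure : String) (length : Int) : List (List Int) :=
  magicLoopA figure length current
    ((PySem.List.pyGet? ((PySem.Dict.get? pvFigures figure).getD [])
      ((PySem.List.pyGet? current (-1)).getD 0)).getD []) []
termination_by ((length - current.length).toNat, 1, 0)

-- the 'for next_pos in …: results += …' loop, accumulator = results
def magicLoopA (figure : String) (length : Int) (current : List Int) :
    List Int → List (List Int) → List (List Int)
  | [], results => results
  | next_pos :: rest, results =>
      let sequence := current ++ [next_pos]
      let add := if _h : (sequence.length : Int) ≥ length then [sequence]
                 else magic_func sequence figure length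
      magicLoopA figure length current rest (results ++ add)
termination_by l _ => ((length - current.length).toNat, 0, l.length)
decreasing_by
  · simp only [sequence, List.length_append, List.length_singleton] at _h
    refine Prod.Lex.left _ _ ?_
    simp only [List.length_append, List.length_singleton]
    omega
  · exact Prod.Lex.right _ (Prod.Lex.right _ (by simp only [List.length_cons]; omega))
end

-- ===== PORT B =====
-- the 'while True' loop; the fuel argument only makes it total in Lean and is never
-- exhausted on inputs satisfying Pre_magic_func
def altLoopB (rows : List (List Int)) (length : Int) :
    Nat → List (List Int) → List (List Int)
  | 0, frontier => frontier
  | fuel + 1, frontier =>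
      let next := frontier.flatMap (fun seq =>
        ((PySem.List.pyGet? rows ((PySem.List.pyGet? seq (-1)).getD 0)).getD []).map
          (fun nxt => seq ++ [nxt]))
      if (((PySem.List.pyGet? next 0).getD []).length : Int) ≥ length then next
      else altLoopB rows length fuel next

def magic_func_alt (current : List Int) (figure : String) (length : Int) : List (List Int) :=
  altLoopB ((PySem.Dict.get? pvFigures figure).getD []) length
    ((length - current.length).toNat + 1) [current]

-- ===== PRECONDITION & SPEC =====
-- Pre_ excludes inputs where Python A raises: unknown figure (TypeError on None[...]), empty
-- current (IndexError), a last element outside [-10, 9] (IndexError on the 10-row table), and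
-- lengths far beyond len(current), on which A's recursion depth exceeds CPython's recursion
-- limit and A raises RecursionError (900 is a conservative under-approximation of that limit).
def Pre_magic_func (current : List Int) (figure : String) (length : Int) : Prop :=
  (figure = "queen" ∨ figure = "king") ∧ current ≠ [] ∧
  -10 ≤ current.getLastD 0 ∧ current.getLastD 0 ≤ 9 ∧
  length ≤ (current.length : Int) + 900
instance (current : List Int) (figure : String) (length : Int) : Decidable (Pre_magic_func current figure length) := by unfold Pre_magic_func; infer_instance

def pvWitness_magic_func : List Int × String × Int := ([5], "king", 2)

def Spec_magic_func (current : List Int) (figure : String) (length : Int) (out : List (List Int)) : Prop := out = magic_func_alt current figure length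
instance (current : List Int) (figure : String) (length : Int) (out : List (List Int)) : Decidable (Spec_magic_func current figure length out) := by unfold Spec_magic_func; infer_instance

-- ===== CLAIM (what is proved, stated in full; the proofs are below) =====
def Claim_equal_magic_func : Prop := ∀ (current : List Int) (figure : String) (length : Int), Dom_magic_func current figure length → Pre_magic_func current figure length → Spec_magic_func current figure length (magic_func current figure length)

-- ===== LEMMAS AND PROOFS =====

-- one level of expansion of a single partial path
def pvExpand (rows : List (List Int)) (seq : List Int) : List (List Int) :=
  ((PySem.List.pyGet? rows ((PySem.List.pyGet? seq (-1)).getD 0)).getD []).map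
    (fun nxt => seq ++ [nxt])

-- the rows table is a 'closed graph': rows nonempty, every entry indexes a row again
def pvRowsOk (rows : List (List Int)) : Prop :=
  ∀ r ∈ rows, r ≠ [] ∧ ∀ e ∈ r, (PySem.List.pyGet? rows e).isSome

-- a partial path whose one-step expansion is well-defined
def pvGood (rows : List (List Int)) (seq : List Int) : Prop :=
  seq ≠ [] ∧ ∃ r ∈ rows, PySem.List.pyGet? rows ((PySem.List.pyGet? seq (-1)).getD 0) = some r

lemma pvRowsOk_queen : pvRowsOk pvQueenRows := by unfold pvRowsOk; decide
lemma pvRowsOk_king : pvRowsOk pvKingRows := by unfold pvRowsOk; decide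

lemma pvGood_expand {rows : List (List Int)} (hR : pvRowsOk rows) {seq : List Int}
    (hg : pvGood rows seq) :
    ∀ t ∈ pvExpand rows seq, t.length = seq.length + 1 ∧ pvGood rows t := by
  obtain ⟨hne, r, hrmem, hget⟩ := hg
  intro t ht
  simp only [pvExpand, hget, Option.getD_some, List.mem_map] at ht
  obtain ⟨e, he, rfl⟩ := ht
  obtain ⟨r', hr'⟩ := Option.isSome_iff_exists.mp ((hR r hrmem).2 e he)
  refine ⟨by simp, by simp, ?_⟩
  simp only [PySem.List.pyGet?_neg_one_append_singleton, Option.getD_some]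
  exact ⟨r', PySem.List.mem_of_pyGet?_eq_some rows hr', hr'⟩

lemma pvExpand_ne_nil {rows : List (List Int)} (hR : pvRowsOk rows) {seq : List Int}
    (hg : pvGood rows seq) : pvExpand rows seq ≠ [] := by
  obtain ⟨hne, r, hrmem, hget⟩ := hg
  simp [pvExpand, hget, (hR r hrmem).1]

-- A's inner loop is an accumulator form of flatMap
lemma magicLoopA_eq (figure : String) (length : Int) (current : List Int) :
    ∀ (l : List Int) (res : List (List Int)),
      magicLoopA figure length current l res =
        res ++ l.flatMap (fun n =>
          if ((current.length : Int) + 1 ≥ length) then [current ++ [n]]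
          else magic_func (current ++ [n]) figure length) := by
  intro l
  induction l with
  | nil => intro res; simp [magicLoopA]
  | cons n rest ih =>
      intro res
      rw [magicLoopA, ih]
      by_cases h : ((current.length : Int) + 1 ≥ length)
      · simp only [List.length_append, List.length_singleton, Nat.cast_add, Nat.cast_one]
        rw [dif_pos h]
        simp [h]
      · simp only [List.length_append, List.length_singleton, Nat.cast_add, Nat.cast_one]
        rw [dif_neg h]
        simp [h]

-- A, characterised through pvExpand
lemma magic_func_unfold (current : List Int) (figure : String) (length : Int) :
    magic_func current figure length =
      if ((current.length : Int) + 1 ≥ length) then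
        pvExpand ((PySem.Dict.get? pvFigures figure).getD []) current
      else
        (pvExpand ((PySem.Dict.get? pvFigures figure).getD []) current).flatMap
          (fun t => magic_func t figure length) := by
  rw [magic_func, magicLoopA_eq]
  by_cases h : ((current.length : Int) + 1 ≥ length)
  · rw [if_pos h, List.nil_append]
    simp only [h, if_true]
    rw [← List.map_eq_flatMap]
    rfl
  · rw [if_neg h, List.nil_append]
    simp only [h, if_false]
    rw [pvExpand, List.map_eq_flatMap, List.flatMap_assoc]
    simp

-- main bridge: DFS over every path of a uniform-length frontier = iterative frontier expansion
lemma pvMain (rows : List (List Int)) (hR : pvRowsOk rows) (figure : String)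
    (hfig : (PySem.Dict.get? pvFigures figure).getD [] = rows) (length : Int) :
    ∀ (fuel : Nat) (ℓ : Nat) (frontier : List (List Int)), frontier ≠ [] →
      (∀ s ∈ frontier, s.length = ℓ ∧ pvGood rows s) →
      1 ≤ fuel → length - (ℓ : Int) ≤ fuel →
      frontier.flatMap (fun s => magic_func s figure length) =
        altLoopB rows length fuel frontier := by
  intro fuel
  induction fuel with
  | zero => intro ℓ frontier _ _ h1 _; omega
  | succ fuel ih =>
      intro ℓ frontier hne hinv _ hbound
      have haltstep : altLoopB rows length (fuel + 1) frontier =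
          (if (((PySem.List.pyGet? (frontier.flatMap (pvExpand rows)) 0).getD []).length : Int) ≥ length
           then frontier.flatMap (pvExpand rows)
           else altLoopB rows length fuel (frontier.flatMap (pvExpand rows))) := by
        rw [altLoopB]
        rfl
      obtain ⟨s₀, rest, rfl⟩ := List.exists_cons_of_ne_nil hne
      have hs₀ := hinv s₀ (by simp)
      obtain ⟨t₀, erest, hexp_eq⟩ := List.exists_cons_of_ne_nil (pvExpand_ne_nil hR hs₀.2)
      have ht₀ : t₀.length = ℓ + 1 ∧ pvGood rows t₀ := by
        have := pvGood_expand hR hs₀.2 t₀ (by rw [hexp_eq]; simp)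
        exact ⟨by rw [this.1, hs₀.1], this.2⟩
      have hhead : (s₀ :: rest).flatMap (pvExpand rows) =
          t₀ :: (erest ++ rest.flatMap (pvExpand rows)) := by
        simp [List.flatMap_cons, hexp_eq]
      have hlen : ((((PySem.List.pyGet? ((s₀ :: rest).flatMap (pvExpand rows)) 0).getD []).length : Nat) : Int)
          = (ℓ : Int) + 1 := by
        rw [hhead, PySem.List.pyGet?_zero_cons, Option.getD_some, ht₀.1]
        push_cast
        ring
      have hinv' : ∀ t ∈ (s₀ :: rest).flatMap (pvExpand rows), t.length = ℓ + 1 ∧ pvGood rows t := by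
        intro t ht
        rw [List.mem_flatMap] at ht
        obtain ⟨s, hs, hts⟩ := ht
        have hsg := hinv s hs
        have := pvGood_expand hR hsg.2 t hts
        exact ⟨by rw [this.1, hsg.1], this.2⟩
      rw [haltstep, hlen]
      by_cases hcond : ((ℓ : Int) + 1 ≥ length)
      · rw [if_pos hcond]
        apply List.flatMap_congr
        intro s hs
        rw [magic_func_unfold, hfig, if_pos (by rw [(hinv s hs).1]; exact hcond)]
      · rw [if_neg hcond]
        have lhs_eq : (s₀ :: rest).flatMap (fun s => magic_func s figure length) =
            ((s₀ :: rest).flatMap (pvExpand rows)).flatMap (fun t => magic_func t figure length) := by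
          rw [List.flatMap_assoc]
          apply List.flatMap_congr
          intro s hs
          rw [magic_func_unfold, hfig, if_neg (by rw [(hinv s hs).1]; exact hcond)]
        rw [lhs_eq]
        exact ih (ℓ + 1) _ (by rw [hhead]; simp) hinv' (by omega) (by push_cast; push_cast at hbound; omega)

-- ===== VERDICT (by name: the statement is the Claim_ definition above) =====
theorem magic_func_spec : Claim_equal_magic_func := by
  intro current figure length _hdom hpre
  obtain ⟨hfig, hne, hlo, hhi, _hcap⟩ := hpre
  have hrows : ∃ rows, (PySem.Dict.get? pvFigures figure).getD [] = rows ∧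
      pvRowsOk rows ∧ rows.length = 10 := by
    rcases hfig with rfl | rfl
    · exact ⟨pvQueenRows, by rfl, pvRowsOk_queen, by rfl⟩
    · exact ⟨pvKingRows, by rfl, pvRowsOk_king, by rfl⟩
  obtain ⟨rows, hfigr, hR, hlen10⟩ := hrows
  have hlast : PySem.List.pyGet? current (-1) = some (current.getLastD 0) := by
    rw [PySem.List.pyGet?_neg_one]
    cases h : current.getLast? with
    | none => exact absurd (List.getLast?_eq_none_iff.mp h) hne
    | some x => simp [List.getLastD_eq_getLast?, h]
  have hvsome : (PySem.List.pyGet? rows (current.getLastD 0)).isSome := by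
    rw [Option.isSome_iff_ne_none]
    intro hnone
    rw [PySem.List.pyGet?_eq_none_iff] at hnone
    apply hnone
    unfold PySem.Raise.InRange
    rw [hlen10]
    omega
  obtain ⟨r, hr⟩ := Option.isSome_iff_exists.mp hvsome
  have hgood : pvGood rows current :=
    ⟨hne, r, PySem.List.mem_of_pyGet?_eq_some rows hr, by rw [hlast, Option.getD_some]; exact hr⟩
  have hmain := pvMain rows hR figure hfigr length ((length - current.length).toNat + 1)
    current.length [current] (by simp)
    (by intro s hs; rw [List.mem_singleton] at hs; subst hs; exact ⟨rfl, hgood⟩)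
    (by omega) (by omega)
  unfold Spec_magic_func magic_func_alt
  rw [hfigr, ← hmain]
  simp
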